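-- pv_equiv track=rewrite | github.com/quan118/aoc2020 | day17_conway_cubes.py | get_full_state_4d
-- ===== SOURCE A (Python) =====
-- def get_full_state_4d(cycles, initial_state):
--   width = len(initial_state[0]) + cycles*2
--   height = len(initial_state) + cycles*2
--   new_state = [[[['.' for x in range(width)] for y in range(height)] for z in range(cycles*2+1)] for w in range(cycles*2+1)]
--
--   for y in range(len(initial_state)):
--     for x in range(len(initial_state[0])):
--       new_state[cycles][cycles][y+cycles][x+cycles] = initial_state[y][x]
--
--   return new_state
-- ===== SOURCE B (Python) =====
-- def get_full_state_4d(cycles, initial_state):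
--   w0 = len(initial_state[0])
--   pad = ['.'] * cycles
--   blank_row = ['.'] * (w0 + 2 * cycles)
--   centre = ([list(blank_row) for _ in range(cycles)]
--             + [pad + row[:w0] + pad for row in initial_state]
--             + [list(blank_row) for _ in range(cycles)])
--   n_rows = len(initial_state) + 2 * cycles
--   return [[centre if (w == cycles and z == cycles)
--            else [list(blank_row) for _ in range(n_rows)]
--            for z in range(2 * cycles + 1)]
--           for w in range(2 * cycles + 1)]
-- ===== Notes on version B (the rewrite author's own statement) =====
-- stated objective: alternative
-- what changed: B constructs the grid by list concatenation and replication -- blank rows/planes are built with ['.' ] * n replication and the centre plane is assembled as blank padding rows plus each input row padded on both sides -- instead of A's per-cell nested loops that fill everything with '.' and then overwrite the centre by index assignment.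
import Mathlib
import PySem

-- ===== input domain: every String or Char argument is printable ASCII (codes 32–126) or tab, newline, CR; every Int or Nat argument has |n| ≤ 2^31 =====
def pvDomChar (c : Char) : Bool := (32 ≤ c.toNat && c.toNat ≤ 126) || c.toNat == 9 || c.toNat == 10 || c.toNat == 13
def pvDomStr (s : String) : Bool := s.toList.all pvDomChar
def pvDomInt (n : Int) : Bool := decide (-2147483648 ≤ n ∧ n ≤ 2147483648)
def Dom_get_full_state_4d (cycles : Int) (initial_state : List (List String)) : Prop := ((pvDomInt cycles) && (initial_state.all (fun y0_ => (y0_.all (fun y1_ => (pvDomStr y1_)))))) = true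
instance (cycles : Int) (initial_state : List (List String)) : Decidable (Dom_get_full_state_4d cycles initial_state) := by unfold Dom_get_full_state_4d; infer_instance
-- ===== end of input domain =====

-- B builds the grid by replication and concatenation (blank rows/planes via list
-- replication, centre plane assembled from padded input rows) instead of A's per-cell
-- nested loops that fill with '.' and overwrite the centre (objective: alternative).

-- ===== PORT A =====
-- Python list assignment 'l[i] = …' as in-place modification: a negative index wraps once;
-- an index Python would raise IndexError on (excluded by Pre_) leaves the list unchanged here.
def pyModI {α : Type} (l : List α) (i : Int) (f : α → α) : List α :=
  if 0 ≤ i then l.modify i.toNat f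
  else if 0 ≤ i + l.length then l.modify (i + l.length).toNat f else l

def get_full_state_4d (cycles : Int) (initial_state : List (List String)) : List (List (List (List String))) :=
  match initial_state.head? with
  | none => []    -- Python raises IndexError on len(initial_state[0]) here (excluded by Pre_)
  | some row0 =>
    let width : Int := (row0.length : Int) + cycles * 2
    let height : Int := (initial_state.length : Int) + cycles * 2
    let new_state :=
      (PySem.List.pyRange 0 (cycles * 2 + 1) 1).map (fun _w =>
        (PySem.List.pyRange 0 (cycles * 2 + 1) 1).map (fun _z =>
          (PySem.List.pyRange 0 height 1).map (fun _y =>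
            (PySem.List.pyRange 0 width 1).map (fun _x => "."))))
    (PySem.List.pyRange 0 (initial_state.length : Int) 1).foldl (fun s y =>
      (PySem.List.pyRange 0 (row0.length : Int) 1).foldl (fun s x =>
        pyModI s cycles (fun a =>
          pyModI a cycles (fun b =>
            pyModI b (y + cycles) (fun row =>
              pyModI row (x + cycles) (fun _ =>
                PySem.List.pyGetD (PySem.List.pyGetD initial_state y []) x "."))))) s) new_state

-- ===== PORT B =====
def get_full_state_4d_alt (cycles : Int) (initial_state : List (List String)) : List (List (List (List String))) :=
  match initial_state.head? with
  | none => []    -- B's Python raises IndexError on len(initial_state[0]) here too (excluded by Pre_)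
  | some row0 =>
    let w0 : Nat := row0.length
    let pad : List String := List.replicate cycles.toNat "."
    let blankRow : List String := List.replicate ((w0 : Int) + 2 * cycles).toNat "."
    let centre : List (List String) :=
      List.replicate cycles.toNat blankRow
        ++ initial_state.map (fun row => pad ++ row.take w0 ++ pad)
        ++ List.replicate cycles.toNat blankRow
    let blankPlane : List (List String) :=
      List.replicate ((initial_state.length : Int) + 2 * cycles).toNat blankRow
    (PySem.List.pyRange 0 (2 * cycles + 1) 1).map (fun w =>
      (PySem.List.pyRange 0 (2 * cycles + 1) 1).map (fun z =>
        if w = cycles ∧ z = cycles then centre else blankPlane))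

-- ===== PRECONDITION & SPEC =====
-- Pre_ excludes exactly the inputs where Python A raises IndexError: the empty grid,
-- a row shorter than the first row, and negative cycles with a nonempty first row.
def Pre_get_full_state_4d (cycles : Int) (initial_state : List (List String)) : Prop :=
  initial_state ≠ [] ∧ (0 ≤ cycles ∨ initial_state.headI = []) ∧
    ∀ row ∈ initial_state, initial_state.headI.length ≤ row.length
instance (cycles : Int) (initial_state : List (List String)) : Decidable (Pre_get_full_state_4d cycles initial_state) := by unfold Pre_get_full_state_4d; infer_instance

def pvWitness_get_full_state_4d : Int × List (List String) := (1, [["#", "."], [".", "#"]])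

def Spec_get_full_state_4d (cycles : Int) (initial_state : List (List String)) (out : List (List (List (List String)))) : Prop := out = get_full_state_4d_alt cycles initial_state
instance (cycles : Int) (initial_state : List (List String)) (out : List (List (List (List String)))) : Decidable (Spec_get_full_state_4d cycles initial_state out) := by unfold Spec_get_full_state_4d; infer_instance

-- ===== CLAIM (what is proved, stated in full; the proofs are below) =====
def Claim_equal_get_full_state_4d : Prop := ∀ (cycles : Int) (initial_state : List (List String)), Dom_get_full_state_4d cycles initial_state → Pre_get_full_state_4d cycles initial_state → Spec_get_full_state_4d cycles initial_state (get_full_state_4d cycles initial_state)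

-- ===== LEMMAS AND PROOFS =====

-- midForm: the per-cell description of the padded grid, the common meeting point of the
-- two proofs (A = midForm by loop analysis, midForm = B by range decomposition).
def midForm (cycles : Int) (initial_state : List (List String)) : List (List (List (List String))) :=
  match initial_state.head? with
  | none => []
  | some row0 =>
    let width : Int := (row0.length : Int) + cycles * 2
    let height : Int := (initial_state.length : Int) + cycles * 2
    let h : Int := (initial_state.length : Int)
    let w0 : Int := (row0.length : Int)
    (PySem.List.pyRange 0 (cycles * 2 + 1) 1).map (fun w =>
      (PySem.List.pyRange 0 (cycles * 2 + 1) 1).map (fun z =>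
        (PySem.List.pyRange 0 height 1).map (fun y =>
          (PySem.List.pyRange 0 width 1).map (fun x =>
            if w = cycles ∧ z = cycles ∧ cycles ≤ y ∧ y < cycles + h ∧ cycles ≤ x ∧ x < cycles + w0
            then PySem.List.pyGetD (PySem.List.pyGetD initial_state (y - cycles) []) (x - cycles) "."
            else "."))))

theorem modify_modify_same {α : Type} (l : List α) (i : Nat) (f g : α → α) :
    (l.modify i f).modify i g = l.modify i (fun a => g (f a)) := by
  apply List.ext_getElem?
  intro j
  simp only [List.getElem?_modify]
  cases l[j]? with
  | none => rfl
  | some a =>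
    by_cases hij : i = j <;> simp [hij]

theorem pyModI_natCast {α : Type} (l : List α) (k : Nat) (f : α → α) :
    pyModI l (k : Int) f = l.modify k f := by
  unfold pyModI
  rw [if_pos (by omega : (0:Int) ≤ (k : Int))]
  simp

theorem pyModI_id {α : Type} (l : List α) (i : Int) :
    pyModI l i (fun a => a) = l := by
  unfold pyModI
  have h : ∀ (m : List α) (k : Nat), m.modify k (fun a => a) = m := by
    intro m k
    apply List.ext_getElem?
    intro j
    simp only [List.getElem?_modify]
    cases m[j]? with
    | none => rfl
    | some a => by_cases hij : k = j <;> simp [hij]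
  split_ifs <;> simp [h]

theorem pyModI_comp {α : Type} (l : List α) (i : Int) (f g : α → α) :
    pyModI (pyModI l i f) i g = pyModI l i (fun a => g (f a)) := by
  by_cases h : 0 ≤ i
  · simp [pyModI, h, modify_modify_same]
  · by_cases h2 : 0 ≤ i + l.length
    · simp [pyModI, h, h2, List.length_modify, modify_modify_same]
    · simp [pyModI, h, h2]

theorem foldl_pyModI_fixed {α β : Type} (i : Int) (F : β → α → α) (l : List β) (s : List α) :
    l.foldl (fun s x => pyModI s i (F x)) s
      = pyModI s i (fun a => l.foldl (fun a x => F x a) a) := by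
  induction l generalizing s with
  | nil => simp [pyModI_id]
  | cons x t ih =>
    simp only [List.foldl_cons]
    rw [ih, pyModI_comp]

theorem modify_map_range {α : Type} (w p : Nat) (g : Nat → α) (f : α → α) :
    ((List.range w).map g).modify p f
      = (List.range w).map (fun k => if k = p then f (g p) else g k) := by
  apply List.ext_getElem?
  intro j
  simp only [List.getElem?_modify, List.getElem?_map]
  by_cases hj : j < w
  · rw [List.getElem?_range hj]
    by_cases hp : p = j
    · subst hp; simp
    · simp only [hp, if_false, Option.map_some]
      rw [if_neg (by omega)]
      rfl
  · have : (List.range w)[j]? = none := by simp; omega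
    simp [this]

theorem fold_modI_range {α : Type} (c width : Nat) (g : Nat → α → α) (d : α) :
    ∀ n, n + c ≤ width →
    (List.range n).foldl (fun l y => pyModI l (((y : Nat) : Int) + (c : Int)) (g y))
        ((List.range width).map fun _ => d)
      = (List.range width).map (fun k => if c ≤ k ∧ k < c + n then g (k - c) d else d) := by
  intro n
  induction n with
  | zero =>
    intro _
    simp only [List.range_zero, List.foldl_nil]
    apply List.map_congr_left
    intro k hk
    rw [if_neg (by omega)]
  | succ n ih =>
    intro h
    rw [List.range_succ, List.foldl_append]
    rw [ih (by omega)]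
    simp only [List.foldl_cons, List.foldl_nil]
    have hcast : ((n : Nat) : Int) + (c : Int) = (((n + c : Nat)) : Int) := by push_cast; ring
    rw [hcast, pyModI_natCast, modify_map_range]
    apply List.map_congr_left
    intro k hk
    simp only [List.mem_range] at hk
    by_cases hkp : k = n + c
    · subst hkp
      rw [if_pos rfl, if_neg (by omega), if_pos (by omega)]
      congr 1
      omega
    · rw [if_neg hkp]
      split_ifs with h1 h2 h2 <;> first | rfl | omega

theorem foldl_self_id {α β : Type} (l : List β) (s : α) :
    l.foldl (fun s _ => s) s = s := by
  induction l <;> simp [*]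

theorem main_case_eq (c : Nat) (r0 : List String) (rest : List (List String)) :
    get_full_state_4d (c : Int) (r0 :: rest) = midForm (c : Int) (r0 :: rest) := by
  unfold get_full_state_4d midForm
  simp only [List.head?_cons]
  have e1 : (c : Int) * 2 + 1 = ((2 * c + 1 : Nat) : Int) := by push_cast; ring
  have e2 : (((r0 :: rest).length : Nat) : Int) + (c : Int) * 2
      = (((r0 :: rest).length + 2 * c : Nat) : Int) := by push_cast; ring
  have e3 : ((r0.length : Nat) : Int) + (c : Int) * 2
      = ((r0.length + 2 * c : Nat) : Int) := by push_cast; ring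
  rw [e1, e2, e3]
  simp only [PySem.List.pyRange_zero_nat, List.foldl_map, List.map_map, Function.comp_def]
  simp only [foldl_pyModI_fixed]
  rw [pyModI_natCast, modify_map_range]
  apply List.map_congr_left
  intro w hw
  by_cases hwc : w = c
  · rw [hwc, if_pos rfl, pyModI_natCast, modify_map_range]
    apply List.map_congr_left
    intro z hz
    by_cases hzc : z = c
    · rw [hzc, if_pos rfl]
      rw [fold_modI_range c ((r0 :: rest).length + 2 * c)
        (fun y row => List.foldl (fun a x_1 => pyModI a (((x_1 : Nat) : Int) + (c : Int))
          (fun _ => PySem.List.pyGetD (PySem.List.pyGetD (r0 :: rest) ((y : Nat) : Int) []) ((x_1 : Nat) : Int) "."))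
          row (List.range r0.length))
        (List.map (fun _ => ".") (List.range (r0.length + 2 * c)))
        (r0 :: rest).length (by omega)]
      apply List.map_congr_left
      intro y hyy
      simp only [List.mem_range] at hyy
      by_cases hyr : c ≤ y ∧ y < c + (r0 :: rest).length
      · rw [if_pos hyr]
        rw [fold_modI_range c (r0.length + 2 * c)
          (fun x _ => PySem.List.pyGetD (PySem.List.pyGetD (r0 :: rest) (((y - c : Nat)) : Int) []) ((x : Nat) : Int) ".")
          "." r0.length (by omega)]
        apply List.map_congr_left
        intro x hx
        simp only [List.mem_range] at hx
        by_cases hxr : c ≤ x ∧ x < c + r0.length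
        · rw [if_pos hxr, if_pos (⟨rfl, rfl, by omega, by omega, by omega, by omega⟩ :
            ((c : Int) = (c : Int) ∧ (c : Int) = (c : Int) ∧ (c : Int) ≤ (y : Int) ∧ (y : Int) < (c : Int) + ((r0 :: rest).length : Int) ∧ (c : Int) ≤ (x : Int) ∧ (x : Int) < (c : Int) + (r0.length : Int)))]
          have c1 : ((y - c : Nat) : Int) = (y : Int) - (c : Int) := by omega
          have c2 : ((x - c : Nat) : Int) = (x : Int) - (c : Int) := by omega
          rw [c1, c2]
        · rw [if_neg hxr, if_neg (by rintro ⟨-, -, -, -, h5, h6⟩; exact hxr ⟨by omega, by omega⟩)]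
      · rw [if_neg hyr]
        apply List.map_congr_left
        intro x hx
        rw [if_neg (by rintro ⟨-, -, h3, h4, -, -⟩; exact hyr ⟨by omega, by omega⟩)]
    · rw [if_neg hzc]
      apply List.map_congr_left
      intro y _
      apply List.map_congr_left
      intro x _
      rw [if_neg (by rintro ⟨-, hzz, -⟩; exact hzc (by exact_mod_cast hzz))]
  · rw [if_neg hwc]
    apply List.map_congr_left
    intro z _
    apply List.map_congr_left
    intro y _
    apply List.map_congr_left
    intro x _
    rw [if_neg (by rintro ⟨hww, -⟩; exact hwc (by exact_mod_cast hww))]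

-- range → replicate / take / map bridges used on the B side
theorem mapRange_const {α : Type} (n : Nat) (a : α) :
    (List.range n).map (fun _ => a) = List.replicate n a := by
  induction n with
  | zero => simp
  | succ n ih => rw [List.range_succ, List.map_append, ih]; simp [List.replicate_succ']

theorem mapRange_split {α : Type} (a b : Nat) (f : Nat → α) :
    (List.range (a + b)).map f
      = (List.range a).map f ++ (List.range b).map (fun i => f (a + i)) := by
  rw [List.range_add, List.map_append, List.map_map]
  simp [Function.comp_def]

theorem mapRange_getD_eq_take {α : Type} (l : List α) (n : Nat) (d : α) (h : n ≤ l.length) :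
    (List.range n).map (fun j => l.getD j d) = l.take n := by
  apply List.ext_getElem?
  intro k
  by_cases hk : k < n
  · rw [List.getElem?_map, List.getElem?_range hk, List.getElem?_take_of_lt hk]
    have hkl : k < l.length := by omega
    simp [List.getD, List.getElem?_eq_getElem hkl]
  · have h1 : ((List.range n).map (fun j => l.getD j d))[k]? = none := by
      simp; omega
    have h2 : (l.take n)[k]? = none := by
      rw [List.getElem?_eq_none] ; simp; omega
    rw [h1, h2]

theorem map_eq_mapRange_getD {α β : Type} (l : List α) (F : α → β) (d : α) :
    (List.range l.length).map (fun i => F (l.getD i d)) = l.map F := by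
  apply List.ext_getElem?
  intro k
  by_cases hk : k < l.length
  · rw [List.getElem?_map, List.getElem?_range hk, List.getElem?_map,
      List.getElem?_eq_getElem hk]
    simp [List.getD, List.getElem?_eq_getElem hk]
  · have h1 : ((List.range l.length).map (fun i => F (l.getD i d)))[k]? = none := by
      simp; omega
    have h2 : (l.map F)[k]? = none := by
      rw [List.getElem?_eq_none]; simp; omega
    rw [h1, h2]

theorem row_eq (c w0 : Nat) (row : List String) (hlen : w0 ≤ row.length) :
    (List.range (w0 + 2 * c)).map (fun (x : Nat) =>
        if (c : Int) ≤ ((x : Nat) : Int) ∧ ((x : Nat) : Int) < (c : Int) + (w0 : Int)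
        then PySem.List.pyGetD row (((x : Nat) : Int) - (c : Int)) "." else ".")
      = List.replicate c "." ++ row.take w0 ++ List.replicate c "." := by
  have hsplit : w0 + 2 * c = c + (w0 + c) := by omega
  rw [hsplit, mapRange_split c (w0 + c), mapRange_split w0 c, List.append_assoc]
  congr 1
  · rw [← mapRange_const c "."]
    apply List.map_congr_left
    intro x hx
    simp only [List.mem_range] at hx
    rw [if_neg (by rintro ⟨h1, -⟩; omega)]
  congr 1
  · rw [← mapRange_getD_eq_take row w0 "." hlen]
    apply List.map_congr_left
    intro j hj
    simp only [List.mem_range] at hj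
    rw [if_pos ⟨by push_cast; omega, by push_cast; omega⟩]
    have hc : ((c + j : Nat) : Int) - (c : Int) = ((j : Nat) : Int) := by push_cast; omega
    rw [hc, PySem.List.pyGetD_natCast]
  · rw [← mapRange_const c "."]
    apply List.map_congr_left
    intro k hk
    simp only [List.mem_range] at hk
    rw [if_neg (by rintro ⟨-, h2⟩; push_cast at h2; omega)]

theorem mid_eq_alt (c : Nat) (r0 : List String) (rest : List (List String))
    (hrow : ∀ row ∈ r0 :: rest, r0.length ≤ row.length) :
    midForm (c : Int) (r0 :: rest) = get_full_state_4d_alt (c : Int) (r0 :: rest) := by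
  unfold midForm get_full_state_4d_alt
  simp only [List.head?_cons]
  have e1 : (c : Int) * 2 + 1 = ((2 * c + 1 : Nat) : Int) := by push_cast; ring
  have e1' : 2 * (c : Int) + 1 = ((2 * c + 1 : Nat) : Int) := by push_cast; ring
  have e2 : (((r0 :: rest).length : Nat) : Int) + (c : Int) * 2
      = (((r0 :: rest).length + 2 * c : Nat) : Int) := by push_cast; ring
  have e3 : ((r0.length : Nat) : Int) + (c : Int) * 2
      = ((r0.length + 2 * c : Nat) : Int) := by push_cast; ring
  have e4 : ((c : Int)).toNat = c := by omega
  have e5 : (((r0.length : Nat) : Int) + 2 * (c : Int)).toNat = r0.length + 2 * c := by omega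
  have e6 : ((((r0 :: rest).length : Nat) : Int) + 2 * (c : Int)).toNat
      = (r0 :: rest).length + 2 * c := by omega
  rw [e1, e1', e2, e3, e4, e5, e6]
  simp only [PySem.List.pyRange_zero_nat, List.map_map, Function.comp_def]
  apply List.map_congr_left
  intro w hw
  apply List.map_congr_left
  intro z hz
  by_cases hwz : ((w : Nat) : Int) = (c : Int) ∧ ((z : Nat) : Int) = (c : Int)
  · rw [if_pos hwz]
    obtain ⟨hw1, hz1⟩ := hwz
    have hw2 : w = c := by exact_mod_cast hw1
    have hz2 : z = c := by exact_mod_cast hz1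
    rw [hw2, hz2]
    -- centre plane: split the row range into top pad, body, bottom pad
    have hsplit : (r0 :: rest).length + 2 * c = c + ((r0 :: rest).length + c) := by omega
    rw [hsplit, mapRange_split c ((r0 :: rest).length + c),
      mapRange_split (r0 :: rest).length c, List.append_assoc]
    congr 1
    · rw [← mapRange_const c (List.replicate (r0.length + 2 * c) ".")]
      apply List.map_congr_left
      intro y hy
      simp only [List.mem_range] at hy
      rw [← mapRange_const (r0.length + 2 * c) "."]
      apply List.map_congr_left
      intro x hx
      rw [if_neg (by rintro ⟨-, -, h3, -⟩; omega)]
    congr 1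
    · rw [← map_eq_mapRange_getD (r0 :: rest)
        (fun row => List.replicate c "." ++ row.take r0.length ++ List.replicate c ".") []]
      apply List.map_congr_left
      intro i hi
      simp only [List.mem_range] at hi
      have hrowlen : r0.length ≤ ((r0 :: rest).getD i []).length := by
        apply hrow
        have : (r0 :: rest).getD i [] = (r0 :: rest)[i] := by
          simp [List.getD, List.getElem?_eq_getElem hi]
        rw [this]; exact List.getElem_mem hi
      rw [← row_eq c r0.length ((r0 :: rest).getD i []) hrowlen]
      apply List.map_congr_left
      intro x hx
      simp only [List.mem_range] at hx
      by_cases hxr : (c : Int) ≤ ((x : Nat) : Int) ∧ ((x : Nat) : Int) < (c : Int) + ((r0.length : Nat) : Int)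
      · rw [if_pos ⟨by trivial, by trivial, by push_cast; omega, by push_cast; omega, hxr.1, hxr.2⟩,
          if_pos hxr]
        have hy : ((c + i : Nat) : Int) - (c : Int) = ((i : Nat) : Int) := by push_cast; omega
        rw [hy, PySem.List.pyGetD_natCast]
      · rw [if_neg (by rintro ⟨-, -, -, -, h5, h6⟩; exact hxr ⟨h5, h6⟩), if_neg hxr]
    · rw [← mapRange_const c (List.replicate (r0.length + 2 * c) ".")]
      apply List.map_congr_left
      intro k hk
      simp only [List.mem_range] at hk
      rw [← mapRange_const (r0.length + 2 * c) "."]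
      apply List.map_congr_left
      intro x hx
      rw [if_neg (by rintro ⟨-, -, -, h4, -⟩; push_cast at h4; omega)]
  · rw [if_neg hwz]
    rw [← mapRange_const ((r0 :: rest).length + 2 * c) (List.replicate (r0.length + 2 * c) ".")]
    apply List.map_congr_left
    intro y hy
    rw [← mapRange_const (r0.length + 2 * c) "."]
    apply List.map_congr_left
    intro x hx
    rw [if_neg (by rintro ⟨h1, h2, -⟩; exact hwz ⟨h1, h2⟩)]

theorem degenerate_A (cycles : Int) (rest : List (List String)) (hc : cycles < 0) :
    get_full_state_4d cycles ([] :: rest) = [] := by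
  unfold get_full_state_4d
  simp only [List.head?_cons]
  have h1 : PySem.List.pyRange 0 (cycles * 2 + 1) 1 = [] :=
    PySem.List.pyRange_one_eq_nil (by omega)
  have h2 : PySem.List.pyRange 0 (([] : List String).length : Int) 1 = [] :=
    PySem.List.pyRange_one_eq_nil (by simp)
  simp only [h1, h2, List.map_nil, List.foldl_nil]
  rw [foldl_self_id]

theorem degenerate_B (cycles : Int) (rest : List (List String)) (hc : cycles < 0) :
    get_full_state_4d_alt cycles ([] :: rest) = [] := by
  unfold get_full_state_4d_alt
  simp only [List.head?_cons]
  have h1 : PySem.List.pyRange 0 (2 * cycles + 1) 1 = [] :=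
    PySem.List.pyRange_one_eq_nil (by omega)
  simp [h1]

-- ===== VERDICT (by name: the statement is the Claim_ definition above) =====
theorem get_full_state_4d_spec : Claim_equal_get_full_state_4d := by
  unfold Claim_equal_get_full_state_4d
  rintro cycles init _ ⟨hne, hdisj, hrow⟩
  unfold Spec_get_full_state_4d
  obtain ⟨r0, rest, rfl⟩ : ∃ r0 rest, init = r0 :: rest := by
    cases init with
    | nil => exact absurd rfl hne
    | cons a t => exact ⟨a, t, rfl⟩
  by_cases hc : 0 ≤ cycles
  · obtain ⟨c, rfl⟩ : ∃ k : Nat, cycles = (k : Int) := ⟨cycles.toNat, (Int.toNat_of_nonneg hc).symm⟩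
    rw [main_case_eq c r0 rest, mid_eq_alt c r0 rest (by simpa using hrow)]
  · have hr0 : r0 = [] := by
      rcases hdisj with h | h
      · exact absurd h hc
      · simpa using h
    subst hr0
    rw [degenerate_A cycles rest (by omega), degenerate_B cycles rest (by omega)]
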